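-- pv_equiv track=rewrite | github.com/AntuanW/ASD-2022 | ćwiczenia/ćw 7 28-05-22/zad_ob_1.py | ad_1
-- ===== SOURCE A (Python) =====
-- def ad_1(T, L):
--
--     n = len(T)
--     curr = 0
--     res = []
--     while curr + L < n - 1:
--         counter = L
--         while not T[curr + counter] and counter >= 0:
--             counter -= 1
--         curr += counter
--         res.append(curr)
--     return res
-- ===== SOURCE B (Python) =====
-- def ad_1(T, L):
--     n = len(T)
--     # prev[i] = index of the last True at or before i (-1 if none): one left-to-right pass
--     prev = []
--     last = -1
--     for i, t in enumerate(T):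
--         if t:
--             last = i
--         prev.append(last)
--     res = []
--     curr = 0
--     while curr + L < n - 1:
--         p = prev[curr + L]
--         if p <= curr:
--             break  # no set bit ahead in the window: cannot advance
--         curr = p
--         res.append(curr)
--     return res
-- ===== Notes on version B (the rewrite author's own statement) =====
-- stated objective: alternative
-- what changed: B precomputes a previous-set-bit index array in one pass and replaces A's inner right-to-left window scan by a single O(1) array lookup per jump.
-- outside the precondition, e.g. on ad_1([True], 0): A returns [], B returns []; on ad_1([False, False, False, False], 1): A raises IndexError, B returns []
import Mathlib
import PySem

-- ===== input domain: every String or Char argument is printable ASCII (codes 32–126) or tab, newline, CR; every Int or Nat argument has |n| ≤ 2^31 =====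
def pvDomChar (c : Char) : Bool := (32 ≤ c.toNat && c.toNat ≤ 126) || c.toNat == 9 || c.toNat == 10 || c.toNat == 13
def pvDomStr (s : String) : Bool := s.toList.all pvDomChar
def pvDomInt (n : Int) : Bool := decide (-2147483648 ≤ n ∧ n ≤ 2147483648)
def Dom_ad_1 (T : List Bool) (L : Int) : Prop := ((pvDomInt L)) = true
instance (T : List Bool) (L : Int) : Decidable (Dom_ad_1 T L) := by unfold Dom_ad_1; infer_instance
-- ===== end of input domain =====

-- B replaces A's inner right-to-left window scan by a precomputed previous-set-bit
-- array with an O(1) lookup per jump (objective: alternative; worst-case O(n + steps)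
-- instead of O(steps * L)).

-- ===== PORT A =====
-- inner 'while not T[curr + counter] and counter >= 0: counter -= 1' (fuel-bounded;
-- 'none' = IndexError, on which Python raises — outside Pre_)
def ad1Inner (T : List Bool) (curr : Int) : Nat → Int → Int
  | 0, counter => counter
  | fuel+1, counter =>
    match PySem.List.pyGet? T (curr + counter) with
    | none => counter
    | some b => if !b && decide (0 ≤ counter) then ad1Inner T curr fuel (counter - 1) else counter

-- outer 'while curr + L < n - 1' loop (fuel-bounded; fuel n+1 suffices on Pre_)
def ad1Outer (T : List Bool) (L : Int) : Nat → Int → List Int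
  | 0, _ => []
  | fuel+1, curr =>
    if curr + L < (T.length : Int) - 1 then
      (curr + ad1Inner T curr (L + 2).toNat L) ::
        ad1Outer T L fuel (curr + ad1Inner T curr (L + 2).toNat L)
    else []

def ad_1 (T : List Bool) (L : Int) : List Int := ad1Outer T L (T.length + 1) 0

-- ===== PORT B =====
-- 'for i, t in enumerate(T): last = i if t else last; prev.append(last)'
def buildPrev : List Bool → Int → Int → List Int
  | [], _, _ => []
  | t :: ts, i, last => (if t then i else last) :: buildPrev ts (i + 1) (if t then i else last)

-- B's jump loop: p = prev[curr + L]; break if p <= curr; else advance to p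
def altLoop (T : List Bool) (L : Int) (prev : List Int) : Nat → Int → List Int
  | 0, _ => []
  | fuel+1, curr =>
    if curr + L < (T.length : Int) - 1 then
      match PySem.List.pyGet? prev (curr + L) with
      | none => []
      | some p => if p ≤ curr then [] else p :: altLoop T L prev fuel p
    else []

def ad_1_alt (T : List Bool) (L : Int) : List Int :=
  altLoop T L (buildPrev T 0 (-1)) (T.length + 1) 0

-- ===== PRECONDITION & SPEC =====
-- Pre_ excludes inputs on which A raises an IndexError via negative wraparound or
-- diverges (it makes no progress or walks left): it requires L ≥ 1 and every window
-- T[i:i+L] with 1 ≤ i and i+L ≤ n-1 to contain a set bit, so every jump advances.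
def Pre_ad_1 (T : List Bool) (L : Int) : Prop :=
  1 ≤ L ∧ ∀ i : Nat, i < T.length → 1 ≤ i → (i : Int) + L ≤ (T.length : Int) - 1 →
    ∃ j : Nat, j < T.length ∧ i ≤ j ∧ (j : Int) < (i : Int) + L ∧ T.getD j false = true
instance (T : List Bool) (L : Int) : Decidable (Pre_ad_1 T L) := by unfold Pre_ad_1; infer_instance

def pvWitness_ad_1 : List Bool × Int := ([true, false, true, true, false, true], 2)

def Spec_ad_1 (T : List Bool) (L : Int) (out : List Int) : Prop := out = ad_1_alt T L
instance (T : List Bool) (L : Int) (out : List Int) : Decidable (Spec_ad_1 T L out) := by unfold Spec_ad_1; infer_instance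

-- ===== CLAIM (what is proved, stated in full; the proofs are below) =====
def Claim_equal_ad_1 : Prop := ∀ (T : List Bool) (L : Int), Dom_ad_1 T L → Pre_ad_1 T L → Spec_ad_1 T L (ad_1 T L)

-- ===== LEMMAS AND PROOFS =====

-- proof-side characterisation of buildPrev's entries
def lastIn : List Bool → Int → Int → Nat → Int
  | [], _, last, _ => last
  | t :: _, base, last, 0 => if t then base else last
  | t :: ts, base, last, j+1 => lastIn ts (base + 1) (if t then base else last) j

theorem buildPrev_get (T : List Bool) (base last : Int) (j : Nat) (hj : j < T.length) :
    (buildPrev T base last)[j]? = some (lastIn T base last j) := by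
  induction T generalizing base last j with
  | nil => simp at hj
  | cons t ts ih =>
    cases j with
    | zero => simp [buildPrev, lastIn]
    | succ j =>
      simp only [buildPrev, lastIn, List.getElem?_cons_succ]
      exact ih _ _ j (by simpa using hj)

theorem lastIn_le (T : List Bool) (base last : Int) (j : Nat) (h : last < base) :
    lastIn T base last j ≤ base + j := by
  induction T generalizing base last j with
  | nil => simp [lastIn]; omega
  | cons t ts ih =>
    cases j with
    | zero => simp [lastIn]; split <;> omega
    | succ j =>
      simp only [lastIn]
      have := ih (base + 1) (if t then base else last) j (by split <;> omega)
      push_cast at this ⊢; omega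

theorem lastIn_peel (T : List Bool) (base last : Int) (j : Nat) (hj : j + 1 < T.length) :
    lastIn T base last (j + 1) =
      if T.getD (j + 1) false then base + (j + 1 : Nat) else lastIn T base last j := by
  induction T generalizing base last j with
  | nil => simp at hj
  | cons t ts ih =>
    cases j with
    | zero =>
      cases ts with
      | nil => simp at hj
      | cons u us =>
        simp only [lastIn, List.getD, List.getElem?_cons_succ, List.getElem?_cons_zero,
          Option.getD_some]
        cases u <;> simp
    | succ j =>
      simp only [lastIn]
      rw [ih (base + 1) (if t then base else last) j (by simpa using hj)]
      simp only [List.getD, List.getElem?_cons_succ]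
      split <;> [push_cast; skip] <;> omega

theorem lastIn_lb (T : List Bool) (j m : Nat) (hm : m ≤ j) (hj : j < T.length)
    (ht : T.getD m false = true) : (m : Int) ≤ lastIn T 0 (-1) j := by
  induction j with
  | zero =>
    interval_cases m
    cases T with
    | nil => simp at hj
    | cons t ts => simp [List.getD] at ht; simp [lastIn, ht]
  | succ j ih =>
    rw [lastIn_peel T 0 (-1) j hj]
    by_cases h : T.getD (j + 1) false = true
    · rw [if_pos h]; push_cast; omega
    · rw [if_neg (by simpa using h)]
      rcases Nat.lt_or_ge m (j + 1) with hlt | hge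
      · exact ih (by omega) (by omega)
      · have hmj : m = j + 1 := by omega
        rw [hmj] at ht; exact absurd ht h

theorem inner_eq (T : List Bool) (c k fuel : Nat) (hfuel : k + 1 ≤ fuel)
    (hn : c + k < T.length) (hp : (c : Int) < lastIn T 0 (-1) (c + k)) :
    ad1Inner T (c : Int) fuel (k : Int) = lastIn T 0 (-1) (c + k) - c := by
  induction k generalizing fuel with
  | zero =>
    have hle := lastIn_le T 0 (-1) c (by omega)
    simp only [Nat.add_zero] at hp
    simp only [zero_add] at hle
    omega
  | succ k ih =>
    obtain ⟨f, rfl⟩ : ∃ f, fuel = f + 1 := ⟨fuel - 1, by omega⟩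
    have hget : PySem.List.pyGet? T ((c : Int) + ((k + 1 : Nat) : Int)) =
        some (T.getD (c + (k + 1)) false) := by
      have h1 : (c : Int) + ((k + 1 : Nat) : Int) = ((c + (k + 1) : Nat) : Int) := by
        push_cast; ring
      rw [h1, PySem.List.pyGet?_natCast, List.getElem?_eq_getElem hn]
      simp [List.getD, List.getElem?_eq_getElem hn]
    have hpeel := lastIn_peel T 0 (-1) (c + k) (by omega)
    have hck : c + k + 1 = c + (k + 1) := by omega
    rw [hck] at hpeel
    by_cases hb : T.getD (c + (k + 1)) false = true
    · -- found: stop with counter = k+1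
      simp only [ad1Inner]
      rw [hget, hb]
      simp only [Bool.not_true, Bool.false_and, Bool.false_eq_true, reduceIte]
      rw [hpeel]
      simp only [hb, if_true]
      push_cast; ring
    · -- not set here: recurse with counter-1
      have hb' : T.getD (c + (k + 1)) false = false := by simpa using hb
      simp only [ad1Inner]
      rw [hget, hb']
      simp only [Bool.not_false, Bool.true_and, decide_eq_true_eq]
      rw [if_pos (by positivity)]
      have harg : ((k + 1 : Nat) : Int) - 1 = (k : Int) := by push_cast; ring
      rw [harg]
      rw [hpeel] at hp ⊢
      simp only [hb', Bool.false_eq_true, if_false] at hp ⊢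
      exact ih f (by omega) (by omega) hp

theorem outer_eq (T : List Bool) (L : Int) (hpre : Pre_ad_1 T L) (fuel : Nat) (c : Nat) :
    ad1Outer T L fuel (c : Int) = altLoop T L (buildPrev T 0 (-1)) fuel (c : Int) := by
  induction fuel generalizing c with
  | zero => rfl
  | succ fuel ih =>
    obtain ⟨hL, hwin⟩ := hpre
    simp only [ad1Outer, altLoop]
    by_cases hcond : (c : Int) + L < (T.length : Int) - 1
    · rw [if_pos hcond, if_pos hcond]
      set k := L.toNat with hk
      have hkL : (k : Int) = L := by omega
      have hckn : c + k < T.length := by omega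
      -- the window [c+1, c+1+L) contains a set bit
      obtain ⟨j, hjn, hj1, hj2, hjt⟩ := hwin (c + 1) (by omega) (by omega) (by push_cast; omega)
      have hplb : (c : Int) < lastIn T 0 (-1) (c + k) :=
        lt_of_lt_of_le (by push_cast; omega) (lastIn_lb T (c + k) j (by omega) hckn hjt)
      -- A's inner scan returns lastIn (c+k) - c
      have hinner : ad1Inner T (c : Int) (L + 2).toNat L = lastIn T 0 (-1) (c + k) - c := by
        have h2 : (L + 2).toNat = k + 2 := by omega
        rw [h2, ← hkL]
        exact inner_eq T c k (k + 2) (by omega) hckn hplb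
      -- B's lookup returns lastIn (c+k)
      have hprev : PySem.List.pyGet? (buildPrev T 0 (-1)) ((c : Int) + L) = some (lastIn T 0 (-1) (c + k)) := by
        have : (c : Int) + L = ((c + k : Nat) : Int) := by omega
        rw [this, PySem.List.pyGet?_natCast, buildPrev_get T 0 (-1) (c + k) (by omega)]
      rw [hinner, hprev]
      have hgt : ¬ (lastIn T 0 (-1) (c + k) ≤ (c : Int)) := by omega
      simp only [hgt, if_false]
      have hcurr' : (c : Int) + (lastIn T 0 (-1) (c + k) - c) = lastIn T 0 (-1) (c + k) := by ring
      rw [hcurr']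
      congr 1
      have h0 : 0 ≤ lastIn T 0 (-1) (c + k) := by omega
      have := ih (lastIn T 0 (-1) (c + k)).toNat
      rwa [Int.toNat_of_nonneg h0] at this
    · rw [if_neg hcond, if_neg hcond]

-- ===== VERDICT (by name: the statement is the Claim_ definition above) =====
theorem ad_1_spec : Claim_equal_ad_1 := by
  intro T L _ hpre
  unfold Spec_ad_1 ad_1 ad_1_alt
  have := outer_eq T L hpre (T.length + 1) 0
  simpa using this
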